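-- pv_equiv track=rewrite | github.com/cms-PdmV/cmsPdmV | mcm/ValidationControl.py | parse_error_out
-- ===== SOURCE A (Python) =====
-- def parse_error_out(error_out):
--     lines = error_out.split('\n')
--     parsed_lines = ''
--     previous_line = ''
--     events_log_start = False
--     for line in lines:
--         if 'Begin processing the' in line:
--             if not events_log_start:
--                 parsed_lines += line + '\n'
--                 parsed_lines += '....\n'
--                 events_log_start = True
--             previous_line = line
--         elif events_log_start:
--             parsed_lines += previous_line + '\n'
--             parsed_lines += line + '\n'
--             events_log_start = False
--         else:
--             parsed_lines += line + '\n'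
--     return parsed_lines
-- ===== SOURCE B (Python) =====
-- def parse_error_out(error_out):
--     lines = error_out.split('\n')
--     out = []
--     pending = None
--     i = 0
--     n = len(lines)
--     while i < n:
--         is_begin = 'Begin processing the' in lines[i]
--         j = i + 1
--         while j < n and ('Begin processing the' in lines[j]) == is_begin:
--             j += 1
--         if is_begin:
--             out.append(lines[i] + '\n....\n')
--             pending = lines[j - 1]
--         else:
--             if pending is not None:
--                 out.append(pending + '\n' + lines[i] + '\n')
--                 pending = None
--                 for k in range(i + 1, j):
--                     out.append(lines[k] + '\n')
--             else:
--                 for k in range(i, j):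
--                     out.append(lines[k] + '\n')
--         i = j
--     return ''.join(out)
-- ===== Notes on version B (the rewrite author's own statement) =====
-- stated objective: alternative
-- what changed: B traverses the lines run-by-run, grouping maximal consecutive blocks by the 'Begin processing the' predicate and holding the run's last line as a pending value, collecting pieces into a list joined at the end, instead of A's per-line loop with a boolean flag and string accumulation.
import Mathlib
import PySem

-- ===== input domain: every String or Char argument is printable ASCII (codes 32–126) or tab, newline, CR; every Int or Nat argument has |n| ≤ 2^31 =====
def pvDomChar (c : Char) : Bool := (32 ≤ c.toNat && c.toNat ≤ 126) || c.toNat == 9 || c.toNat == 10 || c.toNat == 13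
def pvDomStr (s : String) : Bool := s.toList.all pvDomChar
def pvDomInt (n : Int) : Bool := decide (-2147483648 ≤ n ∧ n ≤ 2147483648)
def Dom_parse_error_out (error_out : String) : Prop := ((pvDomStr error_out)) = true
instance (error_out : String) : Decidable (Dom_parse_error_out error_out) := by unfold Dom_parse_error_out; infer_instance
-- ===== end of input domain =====

-- B replaces A's per-line loop with a boolean flag by a run-by-run traversal (grouping consecutive
-- lines by the 'Begin processing the' predicate, holding a pending last line) joined at the end;
-- objective: alternative decomposition, same return value.

-- ===== PORT A =====
-- the marker substring tested by 'Begin processing the' in line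
def pvKey : List Char := "Begin processing the".toList

-- the body of A's for-loop; state = (parsed_lines, previous_line, events_log_start),
-- strings kept as List Char (Python's str concatenation = List.append on code points)
def pvStepA (st : List Char × List Char × Bool) (line : List Char) : List Char × List Char × Bool :=
  let (parsed, prev, flag) := st
  if PySem.Chars.isIn pvKey line then
    if flag = false then
      (parsed ++ line ++ ['\n'] ++ "....".toList ++ ['\n'], line, true)
    else (parsed, line, true)
  else if flag then (parsed ++ prev ++ ['\n'] ++ line ++ ['\n'], prev, false)
  else (parsed ++ line ++ ['\n'], prev, false)

-- lines = error_out.split('\n'); then A's for-loop, returning parsed_lines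
def parse_error_out (error_out : String) : String :=
  String.ofList ((PySem.Chars.splitOn error_out.toList ['\n']).foldl pvStepA ([], [], false)).1

-- ===== PORT B =====
-- Source B's outer while-loop: consume one maximal run of lines with equal key-membership per step;
-- 'pending' is Source B's pending variable, the returned pieces are Source B's 'out' list
def pvRunsB (lines : List (List Char)) (pending : Option (List Char)) : List (List Char) :=
  match lines with
  | [] => []
  | l :: rest =>
    let b := PySem.Chars.isIn pvKey l
    let tw := rest.takeWhile (fun x => PySem.Chars.isIn pvKey x == b)
    let rest' := rest.dropWhile (fun x => PySem.Chars.isIn pvKey x == b)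
    if b then
      (l ++ "\n....\n".toList) :: pvRunsB rest' (some (tw.getLastD l))
    else
      match pending with
      | some p => (p ++ ['\n'] ++ l ++ ['\n']) :: (tw.map (fun x => x ++ ['\n']) ++ pvRunsB rest' none)
      | none => ((l :: tw).map (fun x => x ++ ['\n']) ++ pvRunsB rest' none)
termination_by lines.length
decreasing_by
  all_goals
    simp only [List.length_cons]
    exact Nat.lt_succ_of_le (List.length_dropWhile_le _ _)

-- lines = error_out.split('\n'); ''.join(out) = concatenation of the collected pieces
def parse_error_out_alt (error_out : String) : String :=
  String.ofList (pvRunsB (PySem.Chars.splitOn error_out.toList ['\n']) none).flatten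

-- ===== PRECONDITION & SPEC =====
def Spec_parse_error_out (error_out : String) (out : String) : Prop := out = parse_error_out_alt error_out
instance (error_out : String) (out : String) : Decidable (Spec_parse_error_out error_out out) := by unfold Spec_parse_error_out; infer_instance

-- ===== CLAIM (what is proved, stated in full; the proofs are below) =====
def Claim_equal_parse_error_out : Prop := ∀ (error_out : String), Dom_parse_error_out error_out → Spec_parse_error_out error_out (parse_error_out error_out)

-- ===== LEMMAS AND PROOFS =====

-- clean unfoldings of pvRunsB with the run predicate normalised per branch
lemma pvRunsB_cons_true (l : List Char) (rest : List (List Char)) (pending : Option (List Char))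
    (hb : PySem.Chars.isIn pvKey l = true) :
    pvRunsB (l :: rest) pending =
      (l ++ "\n....\n".toList) ::
        pvRunsB (rest.dropWhile (fun x => PySem.Chars.isIn pvKey x))
          (some ((rest.takeWhile (fun x => PySem.Chars.isIn pvKey x)).getLastD l)) := by
  rw [pvRunsB.eq_def]
  simp only [hb, beq_true, if_true]

lemma pvRunsB_cons_false_none (l : List Char) (rest : List (List Char))
    (hb : PySem.Chars.isIn pvKey l = false) :
    pvRunsB (l :: rest) none =
      ((l :: rest.takeWhile (fun x => !PySem.Chars.isIn pvKey x)).map (fun x => x ++ ['\n']))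
        ++ pvRunsB (rest.dropWhile (fun x => !PySem.Chars.isIn pvKey x)) none := by
  rw [pvRunsB.eq_def]
  simp only [hb, beq_false, Bool.false_eq_true, if_false, List.map_cons]

lemma pvRunsB_cons_false_some (l p : List Char) (rest : List (List Char))
    (hb : PySem.Chars.isIn pvKey l = false) :
    pvRunsB (l :: rest) (some p) =
      (p ++ ['\n'] ++ l ++ ['\n']) ::
        ((rest.takeWhile (fun x => !PySem.Chars.isIn pvKey x)).map (fun x => x ++ ['\n'])
          ++ pvRunsB (rest.dropWhile (fun x => !PySem.Chars.isIn pvKey x)) none) := by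
  rw [pvRunsB.eq_def]
  simp only [hb, beq_false, Bool.false_eq_true, if_false]

-- A's loop over a run of marker lines with the flag already set: only previous_line changes
lemma pvFoldA_begin_true (run : List (List Char))
    (h : ∀ l ∈ run, PySem.Chars.isIn pvKey l = true) (acc prev : List Char) :
    run.foldl pvStepA (acc, prev, true) = (acc, run.getLastD prev, true) := by
  induction run generalizing prev with
  | nil => rfl
  | cons l t ih =>
      have hl : PySem.Chars.isIn pvKey l = true := h l (List.mem_cons_self ..)
      simp only [List.foldl_cons, pvStepA, hl, if_true, List.getLastD_cons]
      exact ih (fun x hx => h x (List.mem_cons_of_mem _ hx)) l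

-- A's loop over a nonempty run of marker lines with the flag clear: emits head + '....', sets the flag
lemma pvFoldA_begin_false (l : List Char) (t : List (List Char))
    (h : ∀ x ∈ l :: t, PySem.Chars.isIn pvKey x = true) (acc prev : List Char) :
    (l :: t).foldl pvStepA (acc, prev, false)
      = (acc ++ l ++ "\n....\n".toList, t.getLastD l, true) := by
  have hl : PySem.Chars.isIn pvKey l = true := h l (List.mem_cons_self ..)
  simp only [List.foldl_cons, pvStepA, hl, if_true]
  rw [pvFoldA_begin_true t (fun x hx => h x (List.mem_cons_of_mem _ hx)) _ l]
  simp

-- A's loop over a run of non-marker lines with the flag clear: each line is emitted verbatim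
lemma pvFoldA_plain_false (run : List (List Char))
    (h : ∀ l ∈ run, PySem.Chars.isIn pvKey l = false) (acc prev : List Char) :
    run.foldl pvStepA (acc, prev, false)
      = (acc ++ (run.map (fun x => x ++ ['\n'])).flatten, prev, false) := by
  induction run generalizing acc with
  | nil => simp
  | cons l t ih =>
      have hl : PySem.Chars.isIn pvKey l = false := h l (List.mem_cons_self ..)
      simp only [List.foldl_cons, pvStepA, hl, Bool.false_eq_true, if_false]
      rw [ih (fun x hx => h x (List.mem_cons_of_mem _ hx))]
      simp

-- the main correspondence: A's fold from flag=false produces B's pieces with pending=none, and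
-- from flag=true (when the next line is not a marker line) B's pieces with pending=previous_line
lemma pvMain (n : Nat) : ∀ (lines : List (List Char)), lines.length ≤ n →
    (∀ acc prev, (lines.foldl pvStepA (acc, prev, false)).1 = acc ++ (pvRunsB lines none).flatten)
    ∧ (∀ acc prev, (∀ l₀ t₀, lines = l₀ :: t₀ → PySem.Chars.isIn pvKey l₀ = false) →
        (lines.foldl pvStepA (acc, prev, true)).1 = acc ++ (pvRunsB lines (some prev)).flatten) := by
  induction n with
  | zero =>
      intro lines hlen
      have : lines = [] := List.eq_nil_of_length_eq_zero (Nat.le_zero.mp hlen)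
      subst this
      exact ⟨fun acc prev => by simp [pvRunsB], fun acc prev _ => by simp [pvRunsB]⟩
  | succ n ih =>
      intro lines hlen
      match lines with
      | [] => exact ⟨fun acc prev => by simp [pvRunsB], fun acc prev _ => by simp [pvRunsB]⟩
      | l :: rest =>
        by_cases hb : PySem.Chars.isIn pvKey l = true
        · -- a run of marker lines
          have hsplit : rest.takeWhile (fun x => PySem.Chars.isIn pvKey x)
              ++ rest.dropWhile (fun x => PySem.Chars.isIn pvKey x) = rest :=
            List.takeWhile_append_dropWhile
          have hrest' : (rest.dropWhile (fun x => PySem.Chars.isIn pvKey x)).length ≤ n := by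
            have h1 := List.length_dropWhile_le (fun x => PySem.Chars.isIn pvKey x) rest
            simp only [List.length_cons] at hlen
            omega
          have ihd := ih _ hrest'
          have hallrun : ∀ x ∈ l :: rest.takeWhile (fun x => PySem.Chars.isIn pvKey x),
              PySem.Chars.isIn pvKey x = true := by
            intro x hx
            rcases List.mem_cons.mp hx with h | h
            · subst h; exact hb
            · exact List.mem_takeWhile_imp h
          have hnext : ∀ l₀ t₀, rest.dropWhile (fun x => PySem.Chars.isIn pvKey x) = l₀ :: t₀ →
              PySem.Chars.isIn pvKey l₀ = false := by
            intro l₀ t₀ heq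
            have := List.head?_dropWhile_not (fun x => PySem.Chars.isIn pvKey x) rest
            rw [heq] at this
            simpa using this
          refine ⟨fun acc prev => ?_, fun acc prev hcontra => ?_⟩
          · conv_lhs => rw [show l :: rest
              = (l :: rest.takeWhile (fun x => PySem.Chars.isIn pvKey x))
                  ++ rest.dropWhile (fun x => PySem.Chars.isIn pvKey x) from by
                rw [List.cons_append, hsplit]]
            rw [List.foldl_append, pvFoldA_begin_false l _ hallrun acc prev]
            rw [ihd.2 _ _ hnext, pvRunsB_cons_true l rest none hb]
            simp
          · exact absurd (hcontra l rest rfl) (by simp [hb])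
        · -- a run of plain lines
          have hbf : PySem.Chars.isIn pvKey l = false := by simpa using hb
          have hsplit : rest.takeWhile (fun x => !PySem.Chars.isIn pvKey x)
              ++ rest.dropWhile (fun x => !PySem.Chars.isIn pvKey x) = rest :=
            List.takeWhile_append_dropWhile
          have hrest' : (rest.dropWhile (fun x => !PySem.Chars.isIn pvKey x)).length ≤ n := by
            have h1 := List.length_dropWhile_le (fun x => !PySem.Chars.isIn pvKey x) rest
            simp only [List.length_cons] at hlen
            omega
          have ihd := ih _ hrest'
          have htw : ∀ x ∈ rest.takeWhile (fun x => !PySem.Chars.isIn pvKey x),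
              PySem.Chars.isIn pvKey x = false := by
            intro x hx
            have := List.mem_takeWhile_imp hx
            simpa using this
          have hallrun : ∀ x ∈ l :: rest.takeWhile (fun x => !PySem.Chars.isIn pvKey x),
              PySem.Chars.isIn pvKey x = false := by
            intro x hx
            rcases List.mem_cons.mp hx with h | h
            · subst h; exact hbf
            · exact htw x h
          refine ⟨fun acc prev => ?_, fun acc prev _ => ?_⟩
          · conv_lhs => rw [show l :: rest
              = (l :: rest.takeWhile (fun x => !PySem.Chars.isIn pvKey x))
                  ++ rest.dropWhile (fun x => !PySem.Chars.isIn pvKey x) from by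
                rw [List.cons_append, hsplit]]
            rw [List.foldl_append, pvFoldA_plain_false _ hallrun acc prev]
            rw [ihd.1, pvRunsB_cons_false_none l rest hbf]
            simp
          · conv_lhs => rw [show l :: rest
              = l :: (rest.takeWhile (fun x => !PySem.Chars.isIn pvKey x)
                  ++ rest.dropWhile (fun x => !PySem.Chars.isIn pvKey x)) from by rw [hsplit]]
            rw [List.foldl_cons]
            simp only [pvStepA, hbf, Bool.false_eq_true, if_false, if_true]
            rw [List.foldl_append, pvFoldA_plain_false _ htw _ prev]
            rw [ihd.1, pvRunsB_cons_false_some l prev rest hbf]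
            simp

-- ===== VERDICT (by name: the statement is the Claim_ definition above) =====
theorem parse_error_out_spec : Claim_equal_parse_error_out := by
  intro error_out _
  unfold Spec_parse_error_out parse_error_out parse_error_out_alt
  rw [(pvMain (PySem.Chars.splitOn error_out.toList ['\n']).length
    (PySem.Chars.splitOn error_out.toList ['\n']) le_rfl).1 [] []]
  simp
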